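-- pv_equiv track=rewrite | github.com/pypi-data/pypi-mirror-221 | packages/pyiono/pyiono-0.1.0-py3-none-any.whl/pyiono/vgos/v_download.py | get_file
-- ===== SOURCE A (Python) =====
-- def get_file(files):
--
--     # get the names of the centres that have available solution
--     centers = [file[0:3] for file in files]
--
--     # get the most recent solution, i.e. final, rapid, 1-day predict, or 2-day predict
--     if 'igs' in centers:
--         file = files[centers.index('igs')]
--     elif 'esa' in centers:
--         file = files[centers.index('esa')]
--     elif 'cod' in centers:
--         file = files[centers.index('cod')]
--     elif 'jpl' in centers:
--         file = files[centers.index('jpl')]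
--     elif 'upc' in centers:
--         file = files[centers.index('upc')]
--     elif 'cas' in centers:
--         file = files[centers.index('cas')]
--     elif 'whu' in centers:
--         file = files[centers.index('whu')]
--     elif 'igr' in centers:
--         file = files[centers.index('igr')]
--     elif 'esr' in centers:
--         file = files[centers.index('esr')]
--     elif 'cor' in centers:
--         file = files[centers.index('cor')]
--     elif 'upr' in centers:
--         file = files[centers.index('upr')]
--     elif 'uqr' in centers:
--         file = files[centers.index('uqr')]
--     elif 'uhr' in centers:
--         file = files[centers.index('uhr')]
--     elif 'ehr' in centers:
--         file = files[centers.index('ehr')]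
--     elif 'car' in centers:
--         file = files[centers.index('car')]
--     elif 'whr' in centers:
--         file = files[centers.index('whr')]
--     elif 'i1p' in centers:
--         file = files[centers.index('i1p')]
--     elif 'c1p' in centers:
--         file = files[centers.index('c1p')]
--     elif 'e1p' in centers:
--         file = files[centers.index('e1p')]
--     elif 'i2p' in centers:
--         file = files[centers.index('i2p')]
--     elif 'c2p' in centers:
--         file = files[centers.index('c2p')]
--     elif 'e2p' in centers:
--         file = files[centers.index('e2p')]
--     elif 'u2p' in centers:
--         file = files[centers.index('u2p')]
--
--     return file
-- ===== SOURCE B (Python) =====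
-- _PRIORITY = ['igs', 'esa', 'cod', 'jpl', 'upc', 'cas', 'whu', 'igr', 'esr',
--              'cor', 'upr', 'uqr', 'uhr', 'ehr', 'car', 'whr', 'i1p', 'c1p',
--              'e1p', 'i2p', 'c2p', 'e2p', 'u2p']
-- _RANK = {p: r for r, p in enumerate(_PRIORITY)}
--
--
-- def get_file(files):
--     # single argmin pass over files: keep the best-ranked (highest-priority) file seen so far
--     best_rank = len(_PRIORITY)
--     for f in files:
--         r = _RANK.get(f[0:3])
--         if r is not None and r < best_rank:
--             best_rank = r
--             file = f
--     return file  # unbound (UnboundLocalError) if no known analysis center appears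
-- ===== Notes on version B (the rewrite author's own statement) =====
-- stated objective: alternative
-- what changed: Replaces A's 23-branch elif chain (each branch an O(n) membership test plus an O(n) .index scan over the centers list) with a single argmin pass over the files that keeps the best-ranked file seen so far, ranks coming from a prefix-to-rank table; the iteration is over files instead of over priorities.
import Mathlib
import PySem

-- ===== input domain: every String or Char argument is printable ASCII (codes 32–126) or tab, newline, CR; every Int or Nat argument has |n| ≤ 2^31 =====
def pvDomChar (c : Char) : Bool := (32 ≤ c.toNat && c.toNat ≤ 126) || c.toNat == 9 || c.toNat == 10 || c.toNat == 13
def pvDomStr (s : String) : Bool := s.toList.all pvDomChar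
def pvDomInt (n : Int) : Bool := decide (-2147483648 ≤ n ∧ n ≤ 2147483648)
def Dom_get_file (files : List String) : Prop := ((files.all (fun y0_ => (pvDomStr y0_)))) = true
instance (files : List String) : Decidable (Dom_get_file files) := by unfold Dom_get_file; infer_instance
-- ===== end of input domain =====

-- B replaces A's 23-branch elif chain over the centers list with a single argmin pass
-- over files keeping the best-ranked file seen so far, using a prefix→rank table (objective: alternative).

-- ===== PORT A =====
def get_file (files : List String) : String :=
  let centers := files.map (fun file => PySem.Str.slice file (some 0) (some 3))
  if "igs" ∈ centers then (PySem.List.pyGet? files (((PySem.List.index? centers "igs").getD 0 : Nat) : Int)).getD ""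
  else if "esa" ∈ centers then (PySem.List.pyGet? files (((PySem.List.index? centers "esa").getD 0 : Nat) : Int)).getD ""
  else if "cod" ∈ centers then (PySem.List.pyGet? files (((PySem.List.index? centers "cod").getD 0 : Nat) : Int)).getD ""
  else if "jpl" ∈ centers then (PySem.List.pyGet? files (((PySem.List.index? centers "jpl").getD 0 : Nat) : Int)).getD ""
  else if "upc" ∈ centers then (PySem.List.pyGet? files (((PySem.List.index? centers "upc").getD 0 : Nat) : Int)).getD ""
  else if "cas" ∈ centers then (PySem.List.pyGet? files (((PySem.List.index? centers "cas").getD 0 : Nat) : Int)).getD ""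
  else if "whu" ∈ centers then (PySem.List.pyGet? files (((PySem.List.index? centers "whu").getD 0 : Nat) : Int)).getD ""
  else if "igr" ∈ centers then (PySem.List.pyGet? files (((PySem.List.index? centers "igr").getD 0 : Nat) : Int)).getD ""
  else if "esr" ∈ centers then (PySem.List.pyGet? files (((PySem.List.index? centers "esr").getD 0 : Nat) : Int)).getD ""
  else if "cor" ∈ centers then (PySem.List.pyGet? files (((PySem.List.index? centers "cor").getD 0 : Nat) : Int)).getD ""
  else if "upr" ∈ centers then (PySem.List.pyGet? files (((PySem.List.index? centers "upr").getD 0 : Nat) : Int)).getD ""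
  else if "uqr" ∈ centers then (PySem.List.pyGet? files (((PySem.List.index? centers "uqr").getD 0 : Nat) : Int)).getD ""
  else if "uhr" ∈ centers then (PySem.List.pyGet? files (((PySem.List.index? centers "uhr").getD 0 : Nat) : Int)).getD ""
  else if "ehr" ∈ centers then (PySem.List.pyGet? files (((PySem.List.index? centers "ehr").getD 0 : Nat) : Int)).getD ""
  else if "car" ∈ centers then (PySem.List.pyGet? files (((PySem.List.index? centers "car").getD 0 : Nat) : Int)).getD ""
  else if "whr" ∈ centers then (PySem.List.pyGet? files (((PySem.List.index? centers "whr").getD 0 : Nat) : Int)).getD ""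
  else if "i1p" ∈ centers then (PySem.List.pyGet? files (((PySem.List.index? centers "i1p").getD 0 : Nat) : Int)).getD ""
  else if "c1p" ∈ centers then (PySem.List.pyGet? files (((PySem.List.index? centers "c1p").getD 0 : Nat) : Int)).getD ""
  else if "e1p" ∈ centers then (PySem.List.pyGet? files (((PySem.List.index? centers "e1p").getD 0 : Nat) : Int)).getD ""
  else if "i2p" ∈ centers then (PySem.List.pyGet? files (((PySem.List.index? centers "i2p").getD 0 : Nat) : Int)).getD ""
  else if "c2p" ∈ centers then (PySem.List.pyGet? files (((PySem.List.index? centers "c2p").getD 0 : Nat) : Int)).getD ""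
  else if "e2p" ∈ centers then (PySem.List.pyGet? files (((PySem.List.index? centers "e2p").getD 0 : Nat) : Int)).getD ""
  else if "u2p" ∈ centers then (PySem.List.pyGet? files (((PySem.List.index? centers "u2p").getD 0 : Nat) : Int)).getD ""
  else ""  -- Python raises UnboundLocalError here (no branch taken); excluded by Pre_get_file

-- ===== PORT B =====
def pvPriority : List String :=
  ["igs", "esa", "cod", "jpl", "upc", "cas", "whu", "igr", "esr", "cor", "upr", "uqr", "uhr", "ehr", "car", "whr", "i1p", "c1p", "e1p", "i2p", "c2p", "e2p", "u2p"]

-- _RANK = {p: r for r, p in enumerate(_PRIORITY)}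
def pvRank : PySem.Dict String Int :=
  (PySem.List.enumerate pvPriority 0).foldl (fun d p => d.insert p.2 p.1) PySem.Dict.empty

-- one iteration of B's loop: update (best_rank, file) if this file's prefix ranks strictly better
def pvScan (st : Int × Option String) (f : String) : Int × Option String :=
  match pvRank.get? (PySem.Str.slice f (some 0) (some 3)) with
  | some r => if r < st.1 then (r, some f) else st
  | none => st

def get_file_alt (files : List String) : String :=
  ((files.foldl pvScan ((pvPriority.length : Int), none)).2).getD ""
  -- Python's `file` is unbound (UnboundLocalError) when the option is none; excluded by Pre_get_file

-- ===== PRECONDITION & SPEC =====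
-- Pre_: some file's 3-char prefix is a known center; on the rest both Pythons raise (A UnboundLocalError).
def Pre_get_file (files : List String) : Prop :=
  (files.any (fun f => pvPriority.contains (PySem.Str.slice f (some 0) (some 3)))) = true
instance (files : List String) : Decidable (Pre_get_file files) := by unfold Pre_get_file; infer_instance

def pvWitness_get_file : List String := ["igsg0010.21i.Z", "codg0010.21i.Z"]

def Spec_get_file (files : List String) (out : String) : Prop := out = get_file_alt files
instance (files : List String) (out : String) : Decidable (Spec_get_file files out) := by unfold Spec_get_file; infer_instance

-- ===== CLAIM (what is proved, stated in full; the proofs are below) =====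
def Claim_equal_get_file : Prop := ∀ (files : List String), Dom_get_file files → Pre_get_file files → Spec_get_file files (get_file files)

-- ===== LEMMAS AND PROOFS =====

-- proof-side reading of A's elif chain: walk a priority list, default d on fall-through
def chainD (files : List String) : List String → String → String
  | [], d => d
  | p :: ps, d =>
    if p ∈ files.map (fun file => PySem.Str.slice file (some 0) (some 3)) then
      (PySem.List.pyGet? files (((PySem.List.index? (files.map (fun file => PySem.Str.slice file (some 0) (some 3))) p).getD 0 : Nat) : Int)).getD ""
    else chainD files ps d

lemma chainD_nil (ps : List String) (d : String) : chainD [] ps d = d := by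
  induction ps with
  | nil => rfl
  | cons p ps ih => simp [chainD, ih]

lemma chainD_append (files ps qs : List String) (d : String) :
    chainD files (ps ++ qs) d = chainD files ps (chainD files qs d) := by
  induction ps with
  | nil => rfl
  | cons p ps ih => simp only [List.cons_append, chainD, ih]

-- A's chain IS chainD on the full priority list
lemma a_eq_chain (files : List String) : get_file files = chainD files pvPriority "" := by
  simp only [get_file, pvPriority, chainD]

-- the rank dict built by the enumerate fold is first-index lookup (pvPriority has no duplicates)
lemma rank_fold (l : List String) (hl : l.Nodup) :
    ∀ (d : PySem.Dict String Int) (k : Int) (q : String),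
    ((PySem.List.enumerate l k).foldl (fun d p => d.insert p.2 p.1) d).get? q
      = ((List.idxOf? q l).map (fun n => (n : Int) + k)).or (d.get? q) := by
  induction l with
  | nil => intro d k q; simp [PySem.List.enumerate, List.idxOf?]
  | cons a l ih =>
    intro d k q
    simp only [PySem.List.enumerate, List.foldl_cons, List.idxOf?_cons]
    rw [ih hl.of_cons]
    by_cases hq : a = q
    · subst hq
      have : List.idxOf? a l = none := List.idxOf?_eq_none_iff.mpr (List.nodup_cons.mp hl).1
      simp [this, PySem.Dict.get?_insert_self]
    · have hbeq : (a == q) = false := by simp [hq]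
      rw [PySem.Dict.get?_insert_of_ne d k (Ne.symm hq)]
      simp only [hbeq, Bool.false_eq_true, if_false]
      cases List.idxOf? q l with
      | none => rfl
      | some n => simp; omega

lemma rank_get (q : String) :
    pvRank.get? q = (List.idxOf? q pvPriority).map (fun n => (n : Int)) := by
  unfold pvRank
  rw [rank_fold pvPriority (by decide)]
  simp [PySem.Dict.get?_empty]

-- prepending a file whose prefix occurs in none of ps does not change the chain
lemma chainD_cons_skip (f : String) (fs ps : List String) (d : String)
    (h : ∀ p ∈ ps, p ≠ PySem.Str.slice f (some 0) (some 3)) :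
    chainD (f :: fs) ps d = chainD fs ps d := by
  induction ps with
  | nil => rfl
  | cons p ps ih =>
    have hp : p ≠ PySem.Str.slice f (some 0) (some 3) := h p (by simp)
    have hbeq : (PySem.Str.slice f (some 0) (some 3) == p) = false :=
      beq_eq_false_iff_ne.mpr (Ne.symm hp)
    simp only [chainD, List.map_cons, List.mem_cons, hp, false_or,
      PySem.List.index?, List.idxOf?_cons, hbeq, Bool.false_eq_true, if_false]
    by_cases hmem : p ∈ fs.map (fun file => PySem.Str.slice file (some 0) (some 3))
    · cases hidx : List.idxOf? p (fs.map (fun file => PySem.Str.slice file (some 0) (some 3))) with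
      | none => exact absurd hmem (List.idxOf?_eq_none_iff.mp hidx)
      | some n => simp [hmem, PySem.List.pyGet?_natCast]
    · simp only [hmem, if_false]
      exact ih (fun q hq => h q (by simp [hq]))

-- the chain headed by f's own prefix returns f
lemma chainD_cons_hit (f : String) (fs ps : List String) (d : String) :
    chainD (f :: fs) (PySem.Str.slice f (some 0) (some 3) :: ps) d = f := by
  simp [chainD, PySem.List.index?, List.idxOf?_cons]

-- main invariant: the fold with current best rank r0 equals the chain over the first r0 priorities
lemma fold_eq_chain (fs : List String) :
    ∀ (r0 : Nat) (b0 : Option String), r0 ≤ pvPriority.length →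
    ((fs.foldl pvScan ((r0 : Int), b0)).2).getD "" = chainD fs (pvPriority.take r0) (b0.getD "") := by
  induction fs with
  | nil => intro r0 b0 _; simp [chainD_nil]
  | cons f fs ih =>
    intro r0 b0 hr
    simp only [List.foldl_cons]
    rcases hidx : List.idxOf? (PySem.Str.slice f (some 0) (some 3)) pvPriority with _ | n
    · -- unknown prefix: state unchanged, f invisible to the chain
      have hscan : pvScan ((r0 : Int), b0) f = ((r0 : Int), b0) := by
        unfold pvScan; rw [rank_get, hidx]; rfl
      rw [hscan, ih r0 b0 hr]
      have hnot : PySem.Str.slice f (some 0) (some 3) ∉ pvPriority := List.idxOf?_eq_none_iff.mp hidx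
      exact (chainD_cons_skip f fs _ _ (fun p hp e => hnot (e ▸ List.mem_of_mem_take hp))).symm
    · obtain ⟨hnlen, hget, hfirst⟩ := List.idxOf?_eq_some_iff.mp hidx
      by_cases hlt : n < r0
      · -- better rank found: state becomes (n, some f); chain stops at priority n with value f
        have hscan : pvScan ((r0 : Int), b0) f = ((n : Int), some f) := by
          unfold pvScan; rw [rank_get, hidx]
          simp [show (n : Int) < (r0 : Int) by exact_mod_cast hlt]
        rw [hscan, ih n (some f) (by omega)]
        have hsplit : pvPriority.take r0
            = pvPriority.take n ++ (PySem.Str.slice f (some 0) (some 3) :: List.take (r0 - n - 1) (pvPriority.drop (n + 1))) := by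
          conv_lhs => rw [← List.take_append_drop n (pvPriority.take r0)]
          rw [List.take_take, Nat.min_eq_left (by omega), List.drop_take,
            ← List.getElem_cons_drop hnlen, hget,
            show r0 - n = (r0 - n - 1) + 1 by omega, List.take_succ_cons]
          simp
        rw [hsplit, chainD_append, chainD_cons_hit]
        refine (chainD_cons_skip f fs _ _ (fun p hp e => ?_)).symm
        rw [List.mem_take_iff_getElem] at hp
        obtain ⟨j, hj, he⟩ := hp
        exact hfirst j (by omega) (by rw [he, e])
      · -- rank not better: state unchanged; no priority among the first r0 matches f's prefix
        have hscan : pvScan ((r0 : Int), b0) f = ((r0 : Int), b0) := by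
          unfold pvScan; rw [rank_get, hidx]
          simp [show ¬ (n : Int) < (r0 : Int) by exact_mod_cast hlt]
        rw [hscan, ih r0 b0 hr]
        refine (chainD_cons_skip f fs _ _ (fun p hp e => ?_)).symm
        rw [List.mem_take_iff_getElem] at hp
        obtain ⟨j, hj, he⟩ := hp
        exact hfirst j (by omega) (by rw [he, e])

-- ===== VERDICT (by name: the statement is the Claim_ definition above) =====
theorem get_file_spec : Claim_equal_get_file := by
  intro files _ _
  unfold Spec_get_file get_file_alt
  rw [fold_eq_chain files pvPriority.length none le_rfl, List.take_length, a_eq_chain]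
  rfl
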